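-- pv_equiv track=rewrite | github.com/hasibgitaccount/machine-learning-creative-it-homeworks | my_homeworks/class9_26@february.py | even_10
-- ===== SOURCE A (Python) =====
-- def even_10(x):
--     counter = 0
--     even = []
--     for i in range(1, x + 1):
--         if i % 2 == 0:
--             counter += 1
--             if counter > 10:
--                 break
--         even.append(i)
--     return even
-- ===== SOURCE B (Python) =====
-- def even_10(x):
--     return list(range(1, x + 1)[:21])
-- ===== Notes on version B (the rewrite author's own statement) =====
-- stated objective: simpler
-- what changed: Replaces the scan-with-even-counter-and-break by directly slicing the first 21 elements of range(1, x+1), since the loop always stops exactly before the 11th even number, i.e. after 21 elements.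
import Mathlib
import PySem

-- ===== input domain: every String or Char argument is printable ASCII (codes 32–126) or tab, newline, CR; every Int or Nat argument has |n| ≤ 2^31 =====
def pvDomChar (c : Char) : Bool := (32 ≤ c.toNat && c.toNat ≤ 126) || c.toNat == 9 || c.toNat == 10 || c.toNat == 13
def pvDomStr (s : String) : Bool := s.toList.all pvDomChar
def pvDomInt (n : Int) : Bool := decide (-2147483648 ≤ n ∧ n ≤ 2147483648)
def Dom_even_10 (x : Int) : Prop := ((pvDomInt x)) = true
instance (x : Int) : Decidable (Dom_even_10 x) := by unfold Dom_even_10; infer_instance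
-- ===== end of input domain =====

-- B replaces A's scan-with-even-counter-and-break by slicing the first 21 elements of range(1, x+1): simpler, same cost.


-- ===== PORT A =====
-- 'for i in range(1, x + 1)' with its break, counter and accumulating list, step for step;
-- the lazy range is ported as the loop variable i running up to stop (Python's range never materializes)
def even10Loop (counter : Int) (even : List Int) (i stop : Int) : List Int :=
  if _h : i < stop then
    if PySem.Int.mod i 2 == 0 then
      if counter + 1 > 10 then even
      else even10Loop (counter + 1) (even ++ [i]) (i + 1) stop
    else even10Loop counter (even ++ [i]) (i + 1) stop
  else even
termination_by (stop - i).toNat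
decreasing_by all_goals omega

def even_10 (x : Int) : List Int :=
  even10Loop 0 [] 1 (x + 1)

-- ===== PORT B =====
-- list(range(1, x + 1)[:21]); Python slices a range in O(1) by clamping its bounds:
-- range(1, x + 1)[:21] = range(1, min(x + 1, 1 + 21))
def even_10_alt (x : Int) : List Int :=
  PySem.List.pyRange 1 (min (x + 1) 22) 1

-- ===== PRECONDITION & SPEC =====
def Spec_even_10 (x : Int) (out : List Int) : Prop := out = even_10_alt x
instance (x : Int) (out : List Int) : Decidable (Spec_even_10 x out) := by unfold Spec_even_10; infer_instance

-- ===== CLAIM (what is proved, stated in full; the proofs are below) =====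
def Claim_equal_even_10 : Prop := ∀ (x : Int), Dom_even_10 x → Spec_even_10 x (even_10 x)

-- ===== LEMMAS AND PROOFS =====

-- list-form mirror of the loop, used only to reason about it
def even10LoopL (counter : Int) (even : List Int) : List Int → List Int
  | [] => even
  | i :: rest =>
      if PySem.Int.mod i 2 == 0 then
        if counter + 1 > 10 then even
        else even10LoopL (counter + 1) (even ++ [i]) rest
      else even10LoopL counter (even ++ [i]) rest

theorem even10Loop_eq_listForm (n : Nat) : ∀ (i stop : Int), (stop - i).toNat = n →
    ∀ (c : Int) (acc : List Int),
    even10Loop c acc i stop = even10LoopL c acc (PySem.List.pyRange i stop 1) := by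
  induction n with
  | zero =>
      intro i stop hn c acc
      rw [even10Loop, dif_neg (by omega), PySem.List.pyRange_one_eq_nil (by omega), even10LoopL]
  | succ n ih =>
      intro i stop hn c acc
      rw [even10Loop, dif_pos (by omega),
          PySem.List.pyRange_one_cons (show i < stop by omega), even10LoopL]
      by_cases he : PySem.Int.mod i 2 == 0
      · rw [if_pos he, if_pos he]
        by_cases hb : c + 1 > 10
        · rw [if_pos hb, if_pos hb]
        · rw [if_neg hb, if_neg hb, ih (i + 1) stop (by omega)]
      · rw [if_neg he, if_neg he, ih (i + 1) stop (by omega)]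

-- when the evens in the remaining list cannot push the counter past 10, the loop never breaks
theorem even10LoopL_no_break (l : List Int) : ∀ (counter : Int) (acc : List Int),
    counter + (l.countP (fun i => PySem.Int.mod i 2 == 0) : Int) ≤ 10 →
    even10LoopL counter acc l = acc ++ l := by
  induction l with
  | nil => intro c acc _; simp [even10LoopL]
  | cons i rest ih =>
      intro c acc h
      simp only [List.countP_cons] at h
      by_cases he : PySem.Int.mod i 2 == 0
      · simp only [he, if_pos] at h ⊢
        rw [even10LoopL, if_pos he, if_neg (by push_cast at h ⊢; omega),
            ih (c + 1) (acc ++ [i]) (by push_cast at h ⊢; omega)]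
        simp
      · simp only [he] at h ⊢
        rw [even10LoopL, if_neg (by simpa using he),
            ih c (acc ++ [i]) (by push_cast at h ⊢; omega)]
        simp

theorem even_10_spec_small (x : Int) (hx : x ≤ 21) : even_10 x = even_10_alt x := by
  unfold even_10 even_10_alt
  rw [even10Loop_eq_listForm (x + 1 - 1).toNat 1 (x + 1) rfl,
      show min (x + 1) 22 = x + 1 from by omega]
  by_cases hz : x + 1 ≤ 1
  · rw [PySem.List.pyRange_one_eq_nil hz, even10LoopL]
  · have hsplit := PySem.List.pyRange_one_append 1 (x + 1) 22 (by omega) (by omega)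
    have hcount : ((PySem.List.pyRange (1:Int) (x + 1) 1).countP
        (fun i => PySem.Int.mod i 2 == 0) : Int) ≤ 10 := by
      have h22 : ((PySem.List.pyRange (1:Int) 22 1).countP
          (fun i => PySem.Int.mod i 2 == 0)) = 10 := by decide
      rw [hsplit, List.countP_append] at h22
      omega
    rw [even10LoopL_no_break _ 0 [] (by omega)]
    simp

theorem even_10_spec_big (x : Int) (hx : 22 ≤ x) : even_10 x = even_10_alt x := by
  unfold even_10 even_10_alt
  rw [even10Loop_eq_listForm (x + 1 - 1).toNat 1 (x + 1) rfl,
      show min (x + 1) 22 = 22 from by omega,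
      PySem.List.pyRange_one_append 1 22 (x + 1) (by omega) (by omega),
      PySem.List.pyRange_one_cons (show (22:Int) < x + 1 by omega),
      show PySem.List.pyRange (1:Int) 22 1
        = [1,2,3,4,5,6,7,8,9,10,11,12,13,14,15,16,17,18,19,20,21] from by decide]
  simp [even10LoopL, PySem.Int.mod]

-- ===== VERDICT (by name: the statement is the Claim_ definition above) =====
theorem even_10_spec : Claim_equal_even_10 := by
  intro x _
  unfold Spec_even_10
  by_cases h : x ≤ 21
  · exact even_10_spec_small x h
  · exact even_10_spec_big x (by omega)
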